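-- pv_equiv track=rewrite | github.com/greenstar7/Codewars_python | solutions/4_kyu/n_linear/n_linear.py | n_linear
-- ===== SOURCE A (Python) =====
-- def n_linear(m, n):
--     u = [1]
--     # индексы елементов на которые мы умножамем М со списка
--     indexes = [0 for _ in m]
--     values = [None for _ in m]
--     len_m = len(m)
--     for i in range(n):
--         for k in range(len_m):
--             values[k] = m[k]*u[indexes[k]]+1
--         min_val = min(values)
--         u.append(min_val)
--         for k in range(len_m):
--             if values[k] == min_val:
--                 indexes[k] += 1
--     return u[-1]
-- ===== SOURCE B (Python) =====
-- def _insert(lst, item):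
--     """Insert item into the sorted list lst, after any equal elements."""
--     pos = 0
--     while pos < len(lst) and lst[pos] <= item:
--         pos += 1
--     lst.insert(pos, item)
--
--
-- def n_linear(m, n):
--     # Sorted frontier of (candidate value, k, index) triples, one per multiplier;
--     # each step pops all minimal candidates and reinserts only the advanced ones.
--     u = [1]
--     frontier = []
--     for k in range(len(m)):
--         _insert(frontier, (m[k] + 1, k, 0))
--     for _ in range(n):
--         mn = frontier[0][0]
--         u.append(mn)
--         popped = []
--         while frontier and frontier[0][0] == mn:
--             popped.append(frontier.pop(0))
--         for _, k, i in popped: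
--             _insert(frontier, (m[k] * u[i + 1] + 1, k, i + 1))
--     return u[-1]
-- ===== Notes on version B (the rewrite author's own statement) =====
-- stated objective: alternative
-- what changed: A recomputes every candidate m[k]*u[indexes[k]]+1 and rescans the whole candidate list for its min each round; B instead maintains a sorted frontier of cached (value, k, index) triples, reads the min off the head, pops exactly the tied entries and reinserts only their recomputed successors.
import Mathlib
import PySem

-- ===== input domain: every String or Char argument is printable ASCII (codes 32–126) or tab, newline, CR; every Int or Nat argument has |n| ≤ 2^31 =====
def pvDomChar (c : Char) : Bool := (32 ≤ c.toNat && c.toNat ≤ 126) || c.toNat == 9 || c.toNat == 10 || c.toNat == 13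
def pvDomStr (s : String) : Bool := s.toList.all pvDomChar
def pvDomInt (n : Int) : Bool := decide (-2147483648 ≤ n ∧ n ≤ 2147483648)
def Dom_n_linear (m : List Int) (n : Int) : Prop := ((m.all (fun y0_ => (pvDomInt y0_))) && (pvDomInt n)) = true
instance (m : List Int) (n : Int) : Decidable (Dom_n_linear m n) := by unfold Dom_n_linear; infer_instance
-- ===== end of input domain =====

-- B replaces A's recompute-every-candidate-each-round scan with a sorted frontier of cached
-- (value, k, index) triples: pop all minimal entries, recompute and reinsert only those (objective: alternative).

-- ===== PORT A =====
-- one iteration of A's outer loop: recompute values[k] for every k, take min, append, bump ties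
def nlStepA (m : List Int) (st : List Int × List Int) : List Int × List Int :=
  let u := st.1
  let indexes := st.2
  let values := List.zipWith (fun mk ix => mk * (PySem.List.pyGetD u ix 0) + 1) m indexes
  let minVal := (PySem.List.min? values (fun x => x)).getD 0
  (u ++ [minVal], List.zipWith (fun ix v => if v == minVal then ix + 1 else ix) indexes values)

def n_linear (m : List Int) (n : Int) : Int :=
  let st := (PySem.List.pyRange 0 n 1).foldl (fun st _ => nlStepA m st)
              ([1], m.map (fun _ => (0 : Int)))
  (PySem.List.pyGet? st.1 (-1)).getD 0

-- ===== PORT B =====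
-- Python tuple comparison (val, k, idx) <= (val', k', idx'): lexicographic
def nlLeE (a b : Int × Int × Int) : Bool :=
  a.1 < b.1 || (a.1 == b.1 && (a.2.1 < b.2.1 || (a.2.1 == b.2.1 && a.2.2 ≤ b.2.2)))

-- port of _insert: scan past every element <= item, insert there (after equals)
def nlInsert (lst : List (Int × Int × Int)) (item : Int × Int × Int) : List (Int × Int × Int) :=
  match lst with
  | [] => [item]
  | b :: t => if nlLeE b item then b :: nlInsert t item else item :: b :: t

-- one iteration of B's outer loop: head of the sorted frontier is the min; pop the ties, reinsert advanced
def nlStepB (m : List Int) (st : List Int × List (Int × Int × Int)) :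
    List Int × List (Int × Int × Int) :=
  let u := st.1
  let f := st.2
  let mn := ((f.head?).map (fun e => e.1)).getD 0   -- frontier[0][0]; empty frontier excluded by Pre_
  let u' := u ++ [mn]
  let popped := f.takeWhile (fun e => e.1 == mn)
  let rest := f.dropWhile (fun e => e.1 == mn)
  let f' := popped.foldl (fun acc e =>
      nlInsert acc ((PySem.List.pyGetD m e.2.1 0) * (PySem.List.pyGetD u' (e.2.2 + 1) 0) + 1,
                    e.2.1, e.2.2 + 1)) rest
  (u', f')

def n_linear_alt (m : List Int) (n : Int) : Int :=
  let f0 := (PySem.List.pyRange 0 (m.length : Int) 1).foldl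
              (fun f k => nlInsert f ((PySem.List.pyGetD m k 0) + 1, k, 0)) []
  let st := (PySem.List.pyRange 0 n 1).foldl (fun st _ => nlStepB m st) ([1], f0)
  (PySem.List.pyGet? st.1 (-1)).getD 0

-- ===== PRECONDITION & SPEC =====
-- excludes only m = [] with n ≥ 1, where Python A raises ValueError (min of an empty list)
def Pre_n_linear (m : List Int) (n : Int) : Prop := 1 ≤ n → m ≠ []
instance (m : List Int) (n : Int) : Decidable (Pre_n_linear m n) := by
  unfold Pre_n_linear; infer_instance

def pvWitness_n_linear : List Int × Int := ([2, 3, 5], 7)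

def Spec_n_linear (m : List Int) (n : Int) (out : Int) : Prop := out = n_linear_alt m n
instance (m : List Int) (n : Int) (out : Int) : Decidable (Spec_n_linear m n out) := by
  unfold Spec_n_linear; infer_instance

-- ===== CLAIM (what is proved, stated in full; the proofs are below) =====
def Claim_equal_n_linear : Prop := ∀ (m : List Int) (n : Int), Dom_n_linear m n →
  Pre_n_linear m n → Spec_n_linear m n (n_linear m n)

-- ===== LEMMAS AND PROOFS =====

-- the canonical frontier: one triple (candidate value, k, index) per position k of m
def nlCanon (m u idx : List Int) : List (Int × Int × Int) :=
  (List.range m.length).map (fun k =>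
    ((m.getD k 0) * (PySem.List.pyGetD u (idx.getD k 0) 0) + 1, (k : Int), idx.getD k 0))

-- invariant tying A's state (u, indexes) to B's frontier
def nlInv (m : List Int) (stA : List Int × List Int) (f : List (Int × Int × Int)) : Prop :=
  stA.2.length = m.length ∧
  (∀ x ∈ stA.2, 0 ≤ x ∧ x < (stA.1.length : Int)) ∧
  f.Perm (nlCanon m stA.1 stA.2) ∧
  f.Pairwise (fun a b => nlLeE a b = true)

theorem nlLeE_of_not (a b : Int × Int × Int) (h : ¬ nlLeE a b = true) : nlLeE b a = true := by
  simp [nlLeE] at *; omega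

theorem nlLeE_trans {a b c : Int × Int × Int}
    (h1 : nlLeE a b = true) (h2 : nlLeE b c = true) : nlLeE a c = true := by
  simp [nlLeE] at *; omega

theorem nlLeE_fst {a b : Int × Int × Int} (h : nlLeE a b = true) : a.1 ≤ b.1 := by
  simp [nlLeE] at h; omega

theorem nlInsert_perm (l : List (Int × Int × Int)) (a : Int × Int × Int) :
    (nlInsert l a).Perm (a :: l) := by
  induction l with
  | nil => simp [nlInsert]
  | cons b t ih =>
    simp only [nlInsert]
    split
    · exact ((ih.cons b).trans (List.Perm.swap a b t))
    · exact List.Perm.refl _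

theorem nlInsert_pairwise (l : List (Int × Int × Int)) (a : Int × Int × Int)
    (h : l.Pairwise (fun x y => nlLeE x y = true)) :
    (nlInsert l a).Pairwise (fun x y => nlLeE x y = true) := by
  induction l with
  | nil => simp [nlInsert]
  | cons b t ih =>
    rcases List.pairwise_cons.mp h with ⟨hb, ht⟩
    simp only [nlInsert]
    split
    · rename_i hba
      refine List.pairwise_cons.mpr ⟨?_, ih ht⟩
      intro y hy
      have := (nlInsert_perm t a).mem_iff.mp hy
      rcases List.mem_cons.mp this with rfl | hyt
      · exact hba
      · exact hb y hyt
    · rename_i hba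
      have hab : nlLeE a b = true := nlLeE_of_not b a hba
      refine List.pairwise_cons.mpr ⟨?_, h⟩
      intro y hy
      rcases List.mem_cons.mp hy with rfl | hyt
      · exact hab
      · exact nlLeE_trans hab (hb y hyt)

theorem foldl_nlInsert_perm (xs l : List (Int × Int × Int)) :
    (xs.foldl nlInsert l).Perm (xs ++ l) := by
  induction xs generalizing l with
  | nil => simp
  | cons x xs ih =>
    simp only [List.foldl_cons, List.cons_append]
    exact (ih (nlInsert l x)).trans
      ((List.Perm.append_left xs (nlInsert_perm l x)).trans List.perm_middle)

theorem foldl_nlInsert_pairwise (xs l : List (Int × Int × Int))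
    (h : l.Pairwise (fun x y => nlLeE x y = true)) :
    (xs.foldl nlInsert l).Pairwise (fun x y => nlLeE x y = true) := by
  induction xs generalizing l with
  | nil => simpa
  | cons x xs ih => exact ih _ (nlInsert_pairwise l x h)

-- zipWith over equal-length lists as a map over range
theorem zipWith_eq_map_range {α β γ : Type} (da : α) (db : β)
    (f : α → β → γ) (xs : List α) (ys : List β) (h : ys.length = xs.length) :
    List.zipWith f xs ys = (List.range xs.length).map (fun k => f (xs.getD k da) (ys.getD k db)) := by
  induction xs generalizing ys with
  | nil => simp
  | cons x xs ih =>
    cases ys with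
    | nil => simp at h
    | cons y ys =>
      simp only [List.length_cons] at h
      simp only [List.zipWith_cons_cons, List.length_cons, List.range_succ_eq_map,
        List.map_cons, List.map_map]
      refine congrArg₂ _ rfl ?_
      rw [ih ys (by omega)]
      rfl

theorem pyGetD_append_left (u : List Int) (x : Int) (i : Int) (d : Int)
    (h0 : 0 ≤ i) (h1 : i < (u.length : Int)) :
    PySem.List.pyGetD (u ++ [x]) i d = PySem.List.pyGetD u i d := by
  rw [PySem.List.pyGetD_eq_getElem (u ++ [x]) d h0 (by simp; omega),
      PySem.List.pyGetD_eq_getElem u d h0 h1,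
      List.getElem_append_left (by omega)]

theorem mem_zipWith_bump {c x : Int} : ∀ {idx values : List Int},
    x ∈ List.zipWith (fun ix v => if v == c then ix + 1 else ix) idx values →
    ∃ y ∈ idx, x = y ∨ x = y + 1 := by
  intro idx
  induction idx with
  | nil => intro values h; simp at h
  | cons a t ih =>
    intro values h
    cases values with
    | nil => simp at h
    | cons v vs =>
      simp only [List.zipWith_cons_cons, List.mem_cons] at h
      rcases h with h | h
      · refine ⟨a, List.mem_cons_self, ?_⟩
        by_cases hv : v = c <;> simp [hv] at h <;> omega
      · obtain ⟨y, hy, hxy⟩ := ih h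
        exact ⟨y, List.mem_cons_of_mem a hy, hxy⟩

theorem nl_head_min {e : Int × Int × Int} {t : List (Int × Int × Int)}
    (hp : (e :: t).Pairwise (fun a b => nlLeE a b = true)) :
    ∀ x ∈ e :: t, e.1 ≤ x.1 := by
  intro x hx
  rcases List.mem_cons.mp hx with rfl | hxt
  · exact le_refl _
  · exact nlLeE_fst ((List.pairwise_cons.mp hp).1 x hxt)

theorem nl_takeWhile_dropWhile_filter (c : Int) : ∀ (l : List (Int × Int × Int)),
    l.Pairwise (fun a b => nlLeE a b = true) → (∀ x ∈ l, c ≤ x.1) →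
    l.takeWhile (fun e => e.1 == c) = l.filter (fun e => e.1 == c) ∧
    l.dropWhile (fun e => e.1 == c) = l.filter (fun e => !(e.1 == c)) := by
  intro l
  induction l with
  | nil => simp
  | cons e t ih =>
    intro hp hge
    rcases List.pairwise_cons.mp hp with ⟨he, ht⟩
    by_cases hc : e.1 = c
    · have hrec := ih ht (fun x hx => hge x (List.mem_cons_of_mem e hx))
      simp [hc, hrec.1, hrec.2]
    · have hne : ∀ x ∈ e :: t, ¬ (x.1 = c) := by
        intro x hx
        rcases List.mem_cons.mp hx with rfl | hxt
        · exact hc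
        · have h1 : e.1 ≤ x.1 := nlLeE_fst (he x hxt)
          have h2 : c ≤ e.1 := hge e List.mem_cons_self
          omega
      constructor
      · rw [List.takeWhile_cons_of_neg (by simp [hc]), Eq.comm, List.filter_eq_nil_iff]
        intro x hx
        simp [hne x hx]
      · rw [List.dropWhile_cons_of_neg (by simp [hc]), Eq.comm, List.filter_eq_self]
        intro x hx
        simp [hne x hx]

theorem nl_values_eq (m u idx : List Int) (hlen : idx.length = m.length) :
    List.zipWith (fun mk ix => mk * (PySem.List.pyGetD u ix 0) + 1) m idx
      = (nlCanon m u idx).map (fun e => e.1) := by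
  rw [zipWith_eq_map_range 0 0 _ _ _ hlen]
  simp [nlCanon, List.map_map]

theorem length_nlCanon (m u idx : List Int) : (nlCanon m u idx).length = m.length := by
  simp [nlCanon]

theorem getD_zipWith {α β γ : Type} (f : α → β → γ) (l1 : List α) (l2 : List β) (k : Nat)
    (d1 : α) (d2 : β) (d3 : γ) (h1 : k < l1.length) (h2 : k < l2.length) :
    (List.zipWith f l1 l2).getD k d3 = f (l1.getD k d1) (l2.getD k d2) := by
  induction l1 generalizing l2 k with
  | nil => simp at h1
  | cons a t ih =>
    cases l2 with
    | nil => simp at h2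
    | cons b s =>
      cases k with
      | zero => simp
      | succ k =>
        simp only [List.zipWith_cons_cons, List.getD_cons_succ]
        exact ih s k (by simpa using h1) (by simpa using h2)

theorem nlCanon_step (m u idx : List Int) (c : Int)
    (hlen : idx.length = m.length)
    (hbnd : ∀ x ∈ idx, 0 ≤ x ∧ x < (u.length : Int)) :
    nlCanon m (u ++ [c])
      (List.zipWith (fun ix v => if v == c then ix + 1 else ix) idx
        (List.zipWith (fun mk ix => mk * (PySem.List.pyGetD u ix 0) + 1) m idx))
      = (nlCanon m u idx).map (fun x => if x.1 == c then
          ((PySem.List.pyGetD m x.2.1 0) * (PySem.List.pyGetD (u ++ [c]) (x.2.2 + 1) 0) + 1,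
            x.2.1, x.2.2 + 1) else x) := by
  apply List.ext_getElem
  · simp [nlCanon]
  · intro k hk1 hk2
    have hkm : k < m.length := by simpa [nlCanon] using hk1
    have hki : k < idx.length := by omega
    have hkv : k < (List.zipWith (fun mk ix => mk * (PySem.List.pyGetD u ix 0) + 1) m idx).length := by
      simp [List.length_zipWith]; omega
    have hvk : (List.zipWith (fun mk ix => mk * (PySem.List.pyGetD u ix 0) + 1) m idx).getD k 0
        = m.getD k 0 * PySem.List.pyGetD u (idx.getD k 0) 0 + 1 :=
      getD_zipWith _ m idx k 0 0 0 hkm hki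
    have hik : (List.zipWith (fun ix v => if v == c then ix + 1 else ix) idx
          (List.zipWith (fun mk ix => mk * (PySem.List.pyGetD u ix 0) + 1) m idx)).getD k 0
        = if (m.getD k 0 * PySem.List.pyGetD u (idx.getD k 0) 0 + 1) == c
            then idx.getD k 0 + 1 else idx.getD k 0 := by
      rw [getD_zipWith _ idx _ k 0 0 0 hki hkv, hvk]
    have hmem : idx.getD k 0 ∈ idx := by
      rw [List.getD_eq_getElem _ _ hki]; exact List.getElem_mem hki
    have hb := hbnd _ hmem
    simp only [nlCanon, List.getElem_map, List.getElem_range, hik, PySem.List.pyGetD_natCast]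
    split_ifs with hc
    · rfl
    · rw [pyGetD_append_left u c _ 0 hb.1 hb.2]

theorem nlStep_rel (m u idx : List Int) (f : List (Int × Int × Int))
    (hinv : nlInv m (u, idx) f) :
    (nlStepA m (u, idx)).1 = (nlStepB m (u, f)).1 ∧
    nlInv m (nlStepA m (u, idx)) (nlStepB m (u, f)).2 := by
  obtain ⟨hlen, hbnd, hperm, hsort⟩ := hinv
  simp only at hlen hbnd hperm hsort
  by_cases hm : m = []
  · subst hm
    have hidx : idx = [] := List.length_eq_zero_iff.mp hlen
    have hf : f = [] := List.perm_nil.mp (by simpa [nlCanon] using hperm)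
    subst hidx hf
    exact ⟨rfl, by simp [nlStepA, nlStepB, nlInv, nlCanon]⟩
  · set values := List.zipWith (fun mk ix => mk * (PySem.List.pyGetD u ix 0) + 1) m idx with hval
    have hv : values = (nlCanon m u idx).map (fun x => x.1) := by
      rw [hval]; exact nl_values_eq m u idx hlen
    have hvlen : values.length = m.length := by rw [hv, List.length_map, length_nlCanon]
    have hA : nlStepA m (u, idx) = (u ++ [(PySem.List.min? values (fun x => x)).getD 0],
        List.zipWith (fun ix v => if v == (PySem.List.min? values (fun x => x)).getD 0
          then ix + 1 else ix) idx values) := rfl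
    set minVal := (PySem.List.min? values (fun x => x)).getD 0 with hminV
    set idx' := List.zipWith (fun ix v => if v == minVal then ix + 1 else ix) idx values
      with hidxp
    have hne : values ≠ [] := by
      intro h
      rw [h] at hvlen
      exact hm (List.length_eq_zero_iff.mp (by simpa using hvlen.symm))
    obtain ⟨v, hvsome⟩ : ∃ v, PySem.List.min? values (fun x => x) = some v := by
      cases h : PySem.List.min? values (fun x => x) with
      | none => exact absurd ((PySem.List.min?_eq_none_iff values (fun x => x)).mp h) hne
      | some v => exact ⟨v, rfl⟩
    have hveq : minVal = v := by rw [hminV, hvsome]; rfl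
    have hvmem : v ∈ values := PySem.List.min?_mem hvsome
    have hvlow : ∀ y ∈ values, v ≤ y := fun y hy => PySem.List.min?_isMin hvsome y hy
    cases f with
    | nil =>
      exfalso
      have := hperm.length_eq
      rw [length_nlCanon] at this
      exact hm (List.length_eq_zero_iff.mp (by simpa using this.symm))
    | cons e t =>
      have he1 : e.1 = minVal := by
        rw [hveq]
        have h1 : v ≤ e.1 := by
          apply hvlow
          rw [hv]
          exact List.mem_map_of_mem (hperm.subset List.mem_cons_self)
        have h2 : e.1 ≤ v := by
          obtain ⟨ec, hec, hecv⟩ := List.mem_map.mp (hv ▸ hvmem)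
          have hcm : ec ∈ e :: t := hperm.mem_iff.mpr hec
          have := nl_head_min hsort ec hcm
          omega
        omega
      have hB : nlStepB m (u, e :: t) = (u ++ [e.1],
          ((e :: t).takeWhile (fun x => x.1 == e.1)).foldl
            (fun acc x => nlInsert acc
              ((PySem.List.pyGetD m x.2.1 0) * (PySem.List.pyGetD (u ++ [e.1]) (x.2.2 + 1) 0) + 1,
                x.2.1, x.2.2 + 1))
            ((e :: t).dropWhile (fun x => x.1 == e.1))) := rfl
      rw [he1] at hB
      have hge : ∀ x ∈ e :: t, minVal ≤ x.1 := by
        intro x hx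
        have hx1 : x.1 ∈ values := by
          rw [hv]; exact List.mem_map_of_mem (hperm.subset hx)
        have := hvlow _ hx1
        omega
      obtain ⟨htw, hdw⟩ := nl_takeWhile_dropWhile_filter minVal (e :: t) hsort hge
      have hcanon' : nlCanon m (u ++ [minVal]) idx'
          = (nlCanon m u idx).map (fun x => if x.1 == minVal then
              ((PySem.List.pyGetD m x.2.1 0) * (PySem.List.pyGetD (u ++ [minVal]) (x.2.2 + 1) 0) + 1,
                x.2.1, x.2.2 + 1) else x) := by
        rw [hidxp, hval]
        exact nlCanon_step m u idx minVal hlen hbnd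
      rw [hA, hB]
      constructor
      · rfl
      · refine ⟨?_, ?_, ?_, ?_⟩
        · simp only
          rw [hidxp, hval]
          simp [List.length_zipWith]
          omega
        · intro x hx
          simp only at hx
          rw [hidxp] at hx
          obtain ⟨y, hy, hxy⟩ := mem_zipWith_bump hx
          have := hbnd y hy
          simp only [List.length_append, List.length_cons, List.length_nil]
          push_cast
          omega
        · simp only
          rw [hcanon', htw, hdw,
            ← List.foldl_map (f := fun x : Int × Int × Int =>
              ((PySem.List.pyGetD m x.2.1 0) * (PySem.List.pyGetD (u ++ [minVal]) (x.2.2 + 1) 0) + 1,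
                x.2.1, x.2.2 + 1)) (g := nlInsert)]
          refine (foldl_nlInsert_perm _ _).trans ?_
          refine List.Perm.trans (List.Perm.append ((hperm.filter _).map _) (hperm.filter _)) ?_
          have h1 : ((nlCanon m u idx).filter (fun x => x.1 == minVal)).map
                (fun x : Int × Int × Int =>
                  ((PySem.List.pyGetD m x.2.1 0) * (PySem.List.pyGetD (u ++ [minVal]) (x.2.2 + 1) 0) + 1,
                    x.2.1, x.2.2 + 1))
              = ((nlCanon m u idx).filter (fun x => x.1 == minVal)).map
                (fun x => if x.1 == minVal then
                  ((PySem.List.pyGetD m x.2.1 0) * (PySem.List.pyGetD (u ++ [minVal]) (x.2.2 + 1) 0) + 1,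
                    x.2.1, x.2.2 + 1) else x) := by
            apply List.map_congr_left
            intro x hx
            have := (List.mem_filter.mp hx).2
            simp only [this, if_true]
          have h2 : (nlCanon m u idx).filter (fun x => !(x.1 == minVal))
              = ((nlCanon m u idx).filter (fun x => !(x.1 == minVal))).map
                (fun x => if x.1 == minVal then
                  ((PySem.List.pyGetD m x.2.1 0) * (PySem.List.pyGetD (u ++ [minVal]) (x.2.2 + 1) 0) + 1,
                    x.2.1, x.2.2 + 1) else x) := by
            nth_rewrite 1 [← List.map_id ((nlCanon m u idx).filter (fun x => !(x.1 == minVal)))]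
            apply List.map_congr_left
            intro x hx
            have := (List.mem_filter.mp hx).2
            simp only [Bool.not_eq_eq_eq_not, Bool.not_true] at this
            simp [this]
          rw [h1, h2, ← List.map_append]
          exact (List.filter_append_perm _ _).map _
        · simp only
          rw [htw, hdw,
            ← List.foldl_map (f := fun x : Int × Int × Int =>
              ((PySem.List.pyGetD m x.2.1 0) * (PySem.List.pyGetD (u ++ [minVal]) (x.2.2 + 1) 0) + 1,
                x.2.1, x.2.2 + 1)) (g := nlInsert)]
          exact foldl_nlInsert_pairwise _ _
            (List.Pairwise.sublist List.filter_sublist hsort)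

theorem nl_loop (m : List Int) (l : List Int) : ∀ (u idx : List Int) (f : List (Int × Int × Int)),
    nlInv m (u, idx) f →
    (l.foldl (fun st _ => nlStepA m st) (u, idx)).1
      = (l.foldl (fun st _ => nlStepB m st) (u, f)).1 ∧
    nlInv m (l.foldl (fun st _ => nlStepA m st) (u, idx))
      (l.foldl (fun st _ => nlStepB m st) (u, f)).2 := by
  induction l with
  | nil => exact fun u idx f h => ⟨rfl, h⟩
  | cons a l ih =>
    intro u idx f h
    obtain ⟨h1, h2⟩ := nlStep_rel m u idx f h
    simp only [List.foldl_cons]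
    have hB : nlStepB m (u, f) = ((nlStepA m (u, idx)).1, (nlStepB m (u, f)).2) := by
      rw [h1]
    have hrec := ih (nlStepA m (u, idx)).1 (nlStepA m (u, idx)).2 (nlStepB m (u, f)).2
      (by rw [Prod.mk.eta]; exact h2)
    rw [hB]
    simpa using hrec

theorem nl_init (m : List Int) :
    nlInv m ([1], m.map (fun _ => (0 : Int)))
      ((PySem.List.pyRange 0 (m.length : Int) 1).foldl
        (fun f k => nlInsert f ((PySem.List.pyGetD m k 0) + 1, k, 0)) []) := by
  have hr := PySem.List.pyRange_zero_natCast m.length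
  have hmapeq : (List.range m.length).map
      (fun k : Nat => ((PySem.List.pyGetD m (k : Int) 0) + 1, (k : Int), (0 : Int)))
      = nlCanon m [1] (m.map (fun _ => (0 : Int))) := by
    apply List.map_congr_left
    intro k _
    simp
  refine ⟨by simp, ?_, ?_, ?_⟩
  · intro x hx
    rcases List.mem_map.mp hx with ⟨y, _, rfl⟩
    simp
  · rw [hr, List.foldl_map,
      ← List.foldl_map (f := fun k : Nat => ((PySem.List.pyGetD m (k : Int) 0) + 1, (k : Int), (0 : Int))) (g := nlInsert)]
    refine ((foldl_nlInsert_perm _ []).trans ?_)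
    rw [List.append_nil, hmapeq]
  · rw [hr, List.foldl_map,
      ← List.foldl_map (f := fun k : Nat => ((PySem.List.pyGetD m (k : Int) 0) + 1, (k : Int), (0 : Int))) (g := nlInsert)]
    exact foldl_nlInsert_pairwise _ [] (List.Pairwise.nil)

theorem nl_main (m : List Int) (n : Int) : n_linear m n = n_linear_alt m n := by
  unfold n_linear n_linear_alt
  have := nl_loop m (PySem.List.pyRange 0 n 1) [1] (m.map (fun _ => (0 : Int)))
    ((PySem.List.pyRange 0 (m.length : Int) 1).foldl
      (fun f k => nlInsert f ((PySem.List.pyGetD m k 0) + 1, k, 0)) [])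
    (nl_init m)
  exact congrArg (fun l : List Int => (PySem.List.pyGet? l (-1)).getD 0) this.1

-- ===== VERDICT (by name: the statement is the Claim_ definition above) =====
theorem n_linear_spec : Claim_equal_n_linear := by
  intro m n _ _
  unfold Spec_n_linear
  exact nl_main m n
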